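-- pv_equiv track=rewrite | github.com/jacksonmarkey/adventofcode2025 | day4.py | neighbor_indices
-- ===== SOURCE A (Python) =====
-- def neighbor_indices(ylen: int, xlen: int, i: int, j: int) -> list[(int, int)]:
--     ret = []
--     deltas = [
--         (-1, -1),
--         (-1, 0),
--         (-1, 1),
--         (0, -1),
--         (0, 1),
--         (1, -1),
--         (1, 0),
--         (1, 1)
--     ]
--     for dy, dx in deltas:
--         if 0 <= i+dy < ylen and 0 <= j+dx < xlen :
--             ret.append((i+dy, j+dx))
--     return ret
-- ===== SOURCE B (Python) =====
-- def neighbor_indices(ylen: int, xlen: int, i: int, j: int) -> list[(int, int)]: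
--     ret = []
--     for y in range(max(0, i - 1), min(ylen, i + 2)):
--         for x in range(max(0, j - 1), min(xlen, j + 2)):
--             if (y, x) != (i, j):
--                 ret.append((y, x))
--     return ret
-- ===== Notes on version B (the rewrite author's own statement) =====
-- stated objective: simpler
-- what changed: Replaced the fixed 8-delta list with a per-delta bounds filter by two nested loops over clamped index ranges that skip only the center cell, preserving row-major order.
import Mathlib
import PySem

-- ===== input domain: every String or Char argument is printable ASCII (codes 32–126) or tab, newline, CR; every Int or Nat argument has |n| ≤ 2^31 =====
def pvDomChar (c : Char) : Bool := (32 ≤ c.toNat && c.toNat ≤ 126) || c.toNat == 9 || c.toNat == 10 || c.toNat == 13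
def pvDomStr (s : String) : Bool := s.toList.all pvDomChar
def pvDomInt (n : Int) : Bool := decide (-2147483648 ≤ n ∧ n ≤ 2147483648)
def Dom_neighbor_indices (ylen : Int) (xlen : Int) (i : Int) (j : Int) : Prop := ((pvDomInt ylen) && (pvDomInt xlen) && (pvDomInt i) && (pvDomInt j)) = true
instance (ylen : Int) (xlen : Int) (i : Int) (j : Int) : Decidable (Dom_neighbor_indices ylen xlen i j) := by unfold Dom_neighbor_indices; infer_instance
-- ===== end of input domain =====

-- B replaces A's fixed 8-delta list + bounds filter with two nested loops over clamped index
-- ranges that skip only the center cell (objective: simpler; same row-major output order).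


-- ===== PORT A =====
def neighbor_indices (ylen : Int) (xlen : Int) (i : Int) (j : Int) : List (Int × Int) :=
  let deltas : List (Int × Int) :=
    [(-1, -1), (-1, 0), (-1, 1), (0, -1), (0, 1), (1, -1), (1, 0), (1, 1)]
  deltas.foldl (fun ret d =>
    if 0 ≤ i + d.1 ∧ i + d.1 < ylen ∧ 0 ≤ j + d.2 ∧ j + d.2 < xlen then
      ret ++ [(i + d.1, j + d.2)]
    else ret) []

-- ===== PORT B =====
def neighbor_indices_alt (ylen : Int) (xlen : Int) (i : Int) (j : Int) : List (Int × Int) :=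
  (PySem.List.pyRange (max 0 (i - 1)) (min ylen (i + 2)) 1).foldl (fun ret y =>
    (PySem.List.pyRange (max 0 (j - 1)) (min xlen (j + 2)) 1).foldl (fun ret x =>
      if (y, x) ≠ (i, j) then ret ++ [(y, x)] else ret) ret) []

-- ===== PRECONDITION & SPEC =====
def Spec_neighbor_indices (ylen : Int) (xlen : Int) (i : Int) (j : Int) (out : List (Int × Int)) : Prop := out = neighbor_indices_alt ylen xlen i j
instance (ylen : Int) (xlen : Int) (i : Int) (j : Int) (out : List (Int × Int)) : Decidable (Spec_neighbor_indices ylen xlen i j out) := by unfold Spec_neighbor_indices; infer_instance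

-- ===== CLAIM (what is proved, stated in full; the proofs are below) =====
def Claim_equal_neighbor_indices : Prop := ∀ (ylen : Int) (xlen : Int) (i : Int) (j : Int), Dom_neighbor_indices ylen xlen i j → Spec_neighbor_indices ylen xlen i j (neighbor_indices ylen xlen i j)

-- ===== LEMMAS AND PROOFS =====

-- a clamped range is the interval-filtered unclamped range
theorem pyRange_clamp (lo hi a b : Int) :
    PySem.List.pyRange (max lo a) (min hi b) 1 =
      (PySem.List.pyRange a b 1).filter (fun y => decide (lo ≤ y) && decide (y < hi)) := by
  have h : ∀ n : Nat, ∀ a b : Int, (b - a).toNat = n →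
      PySem.List.pyRange (max lo a) (min hi b) 1 =
        (PySem.List.pyRange a b 1).filter (fun y => decide (lo ≤ y) && decide (y < hi)) := by
    intro n
    induction n with
    | zero =>
      intro a b ha
      rw [PySem.List.pyRange_one_eq_nil (show b ≤ a by omega),
        PySem.List.pyRange_one_eq_nil (show min hi b ≤ max lo a by omega)]
      simp
    | succ n ih =>
      intro a b ha
      have ih' := ih (a + 1) b (by omega)
      conv_rhs => rw [PySem.List.pyRange_one_cons (show a < b by omega)]
      by_cases hlo : lo ≤ a
      · by_cases hhi : a < hi
        · rw [List.filter_cons_of_pos (by simp [hlo, hhi]), ← ih',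
            show max lo (a + 1) = a + 1 by omega, show max lo a = a by omega,
            PySem.List.pyRange_one_cons (show a < min hi b by omega)]
        · rw [List.filter_cons_of_neg (by simp; omega), ← ih',
            PySem.List.pyRange_one_eq_nil (show min hi b ≤ max lo a by omega),
            PySem.List.pyRange_one_eq_nil (show min hi b ≤ max lo (a + 1) by omega)]
      · rw [List.filter_cons_of_neg (by simp; omega), ← ih',
          show max lo a = max lo (a + 1) by omega]
  exact h (b - a).toNat a b rfl

theorem pyRange_three (a : Int) :
    PySem.List.pyRange (a - 1) (a + 2) 1 = [a - 1, a, a + 1] := by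
  rw [PySem.List.pyRange_one_cons (by omega), PySem.List.pyRange_one_cons (by omega),
    PySem.List.pyRange_one_cons (by omega), PySem.List.pyRange_one_eq_nil (by omega)]
  norm_num

-- flatMap over a filtered list = flatMap with a guard
theorem flatMap_filter_guard {α β : Type} (p : α → Bool) (g : α → List β) :
    ∀ l : List α, (l.filter p).flatMap g = l.flatMap (fun y => if p y = true then g y else []) := by
  intro l
  induction l with
  | nil => rfl
  | cons a t ih =>
    by_cases h : p a = true <;> simp [h, ih]

-- one row of A's delta scan equals the guarded clamped row of B
theorem row_eq (ylen xlen i j dy : Int) (ds : List Int) :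
    ((ds.map (fun dx => ((dy, dx) : Int × Int))).filter
        (fun d => decide (0 ≤ i + d.1 ∧ i + d.1 < ylen ∧ 0 ≤ j + d.2 ∧ j + d.2 < xlen))).map
        (fun d => (i + d.1, j + d.2))
    = if (decide (0 ≤ i + dy) && decide (i + dy < ylen)) = true
      then ((ds.map (fun dx => j + dx)).filter
              (fun x => decide (0 ≤ x) && decide (x < xlen))).map (fun x => (i + dy, x))
      else [] := by
  induction ds with
  | nil => split_ifs <;> simp
  | cons d t ih =>
    simp only [List.map_cons, List.filter_cons]
    by_cases hr : (0 ≤ i + dy ∧ i + dy < ylen) <;>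
    by_cases hc : (0 ≤ j + d ∧ j + d < xlen) <;>
    simp only [decide_eq_true_eq, Bool.and_eq_true] <;>
    split_ifs <;> simp_all

set_option maxHeartbeats 1000000 in
theorem ports_agree (ylen xlen i j : Int) :
    neighbor_indices ylen xlen i j = neighbor_indices_alt ylen xlen i j := by
  unfold neighbor_indices neighbor_indices_alt
  rw [pyRange_clamp 0 ylen (i - 1) (i + 2), pyRange_clamp 0 xlen (j - 1) (j + 2),
    pyRange_three i, pyRange_three j]
  simp only [PySem.List.foldl_append_ite, PySem.List.foldl_append_eq_flatMap, List.nil_append]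
  rw [flatMap_filter_guard]
  -- the three center-cell filters: off-center rows keep everything, the middle row drops x = j
  have hoff : ∀ y : Int, y ≠ i →
      (([j-1, j, j+1].filter (fun x => decide (0 ≤ x) && decide (x < xlen))).filter
        (fun x => decide ((y, x) ≠ (i, j)))) =
      [j-1, j, j+1].filter (fun x => decide (0 ≤ x) && decide (x < xlen)) := by
    intro y hy
    apply List.filter_eq_self.mpr
    intro x _
    simp [Prod.ext_iff, hy]
  have hmid :
      (([j-1, j, j+1].filter (fun x => decide (0 ≤ x) && decide (x < xlen))).filter
        (fun x => decide ((i, x) ≠ (i, j)))) =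
      [j-1, j+1].filter (fun x => decide (0 ≤ x) && decide (x < xlen)) := by
    rw [List.filter_filter]
    have e : ([j-1, j, j+1] : List Int).filter
        (fun x => decide ((i, x) ≠ (i, j)) && (decide (0 ≤ x) && decide (x < xlen))) =
        ([j-1, j, j+1] : List Int).filter
          (fun x => decide (x ≠ j) && (decide (0 ≤ x) && decide (x < xlen))) := by
      apply List.filter_congr
      intro x _
      simp [Prod.ext_iff]
    rw [e]
    simp only [List.filter_cons, List.filter_nil, decide_eq_true_eq, Bool.and_eq_true]
    have n1 : (j - 1 ≠ j) := by omega
    have n2 : (j + 1 ≠ j) := by omega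
    simp [n1, n2]
  have ha := hoff (i - 1) (by omega)
  have hb := hoff (i + 1) (by omega)
  -- split A's 8 deltas into the three rows and rewrite each by row_eq
  rw [show ([(-1, -1), (-1, 0), (-1, 1), (0, -1), (0, 1), (1, -1), (1, 0), (1, 1)] :
        List (Int × Int)) =
      ([-1, 0, 1].map (fun dx => ((-1 : Int), dx))) ++
      (([-1, 1].map (fun dx => ((0 : Int), dx))) ++
       ([-1, 0, 1].map (fun dx => ((1 : Int), dx)))) from rfl,
    List.filter_append, List.filter_append, List.map_append, List.map_append,
    row_eq ylen xlen i j (-1), row_eq ylen xlen i j 0, row_eq ylen xlen i j 1]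
  simp only [List.flatMap_cons, List.flatMap_nil, List.append_nil, ha, hb, hmid,
    show i + (-1) = i - 1 from by ring, show j + (-1) = j - 1 from by ring,
    show i + (0:Int) = i from by ring, show j + (0:Int) = j from by ring,
    List.map_cons, List.map_nil]

-- ===== VERDICT (by name: the statement is the Claim_ definition above) =====
theorem neighbor_indices_spec : Claim_equal_neighbor_indices := by
  intro ylen xlen i j _
  exact ports_agree ylen xlen i j
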